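-- pv_equiv track=rewrite | github.com/ScienceIsNeato/course_record_updater | scripts/ship_it.py | _find_contiguous_line_blocks
-- ===== SOURCE A (Python) =====
-- def _find_contiguous_line_blocks(lines: set[int]) -> list:
--     """Find contiguous line blocks from a set of line numbers."""
--     if not lines:
--         return []
--
--     sorted_lines = sorted(lines)
--     blocks = []
--     block_start = sorted_lines[0]
--     prev_line = sorted_lines[0]
--
--     for line in sorted_lines[1:]:
--         if line > prev_line + 1:
--             blocks.append((block_start, prev_line, prev_line - block_start + 1))
--             block_start = line
--         prev_line = line
--
--     blocks.append((block_start, prev_line, prev_line - block_start + 1))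
--     blocks.sort(key=lambda x: x[2], reverse=True)
--     return blocks
-- ===== SOURCE B (Python) =====
-- def _find_contiguous_line_blocks(lines: set[int]) -> list:
--     """Find contiguous line blocks from a set of line numbers."""
--     s = set(lines)
--     blocks = []
--     for start in sorted(x for x in s if x - 1 not in s):
--         end = start
--         while end + 1 in s:
--             end += 1
--         blocks.append((start, end, end - start + 1))
--     blocks.sort(key=lambda b: b[2], reverse=True)
--     return blocks
-- ===== Notes on version B (the rewrite author's own statement) =====
-- stated objective: alternative
-- what changed: B never merges a sorted run list: it finds block starts purely by set membership (x in s with x-1 not in s), extends each start with a while-loop over membership to find the block end, then sorts the blocks by size; A instead sorts all values and linearly merges consecutive ones.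
import Mathlib
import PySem

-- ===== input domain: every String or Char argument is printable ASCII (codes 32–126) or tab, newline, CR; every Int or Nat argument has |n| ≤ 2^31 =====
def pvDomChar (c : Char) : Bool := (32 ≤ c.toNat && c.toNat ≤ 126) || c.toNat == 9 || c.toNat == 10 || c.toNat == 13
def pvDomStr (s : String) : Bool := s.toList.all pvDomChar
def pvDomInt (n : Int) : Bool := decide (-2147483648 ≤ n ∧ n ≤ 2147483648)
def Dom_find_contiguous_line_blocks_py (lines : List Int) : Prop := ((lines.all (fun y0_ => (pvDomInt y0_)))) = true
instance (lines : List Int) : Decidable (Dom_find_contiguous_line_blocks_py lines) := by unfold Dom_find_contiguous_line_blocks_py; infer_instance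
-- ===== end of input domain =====

-- B finds block starts by set membership (x in s, x-1 not in s) and extends each start with a
-- membership while-loop, instead of A's sort-then-linear-merge; same return value, similar cost.

-- ===== PORT A =====
-- A's loop body: state is (blocks, block_start, prev_line)
def pvStepA (st : List (Int × Int × Int) × Int × Int) (line : Int) :
    List (Int × Int × Int) × Int × Int :=
  if line > st.2.2 + 1 then
    (st.1 ++ [(st.2.1, st.2.2, st.2.2 - st.2.1 + 1)], line, line)
  else (st.1, st.2.1, line)

def find_contiguous_line_blocks_py (lines : List Int) : List (Int × Int × Int) :=
  if lines = [] then []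
  else
    -- sorted(lines) on a Python set = sorted distinct elements
    match PySem.List.sorted (PySem.Set.ofList lines) (fun x => x) false with
    | [] => []  -- unreachable (lines ≠ []); total-guard only
    | h :: t =>  -- h = sorted_lines[0], t = sorted_lines[1:]
      let st := t.foldl pvStepA ([], h, h)
      PySem.List.sorted (st.1 ++ [(st.2.1, st.2.2, st.2.2 - st.2.1 + 1)]) (fun b => b.2.2) true

-- ===== PORT B =====
-- B's while-loop 'while end + 1 in s: end += 1'; the fuel argument (s.length at the call site)
-- only makes the same computation total — a run inside the distinct-element list s is shorter.
def pvRunEnd (s : List Int) (e : Int) : Nat → Int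
  | 0 => e
  | Nat.succ fuel => if (e + 1) ∈ s then pvRunEnd s (e + 1) fuel else e

def find_contiguous_line_blocks_py_alt (lines : List Int) : List (Int × Int × Int) :=
  let s := PySem.Set.ofList lines
  -- sorted(x for x in s if x - 1 not in s): identity key, so independent of set iteration order
  let starts := PySem.List.sorted (s.filter (fun x => decide ((x - 1) ∉ s))) (fun x => x) false
  let blocks := starts.map (fun st =>
    let e := pvRunEnd s st s.length
    (st, e, e - st + 1))
  PySem.List.sorted blocks (fun b => b.2.2) true

-- ===== PRECONDITION & SPEC =====
def Spec_find_contiguous_line_blocks_py (lines : List Int) (out : List (Int × Int × Int)) : Prop := out = find_contiguous_line_blocks_py_alt lines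
instance (lines : List Int) (out : List (Int × Int × Int)) : Decidable (Spec_find_contiguous_line_blocks_py lines out) := by unfold Spec_find_contiguous_line_blocks_py; infer_instance

-- ===== CLAIM (what is proved, stated in full; the proofs are below) =====
def Claim_equal_find_contiguous_line_blocks_py : Prop := ∀ (lines : List Int), Dom_find_contiguous_line_blocks_py lines → Spec_find_contiguous_line_blocks_py lines (find_contiguous_line_blocks_py lines)

-- ===== LEMMAS AND PROOFS =====

-- Reference shape of the pre-sort block list of a run starting at `start` whose last seen value is `prev`
def pvGo (start prev : Int) : List Int → List (Int × Int × Int)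
  | [] => [(start, prev, prev - start + 1)]
  | x :: xs =>
    if x = prev + 1 then pvGo start x xs
    else (start, prev, prev - start + 1) :: pvGo x x xs

-- A's fold equals pvGo on strictly increasing input
lemma pvFoldA_go : ∀ (t : List Int) (blocks : List (Int × Int × Int)) (start prev : Int),
    List.Pairwise (· < ·) (prev :: t) →
    (let st := t.foldl pvStepA (blocks, start, prev)
     st.1 ++ [(st.2.1, st.2.2, st.2.2 - st.2.1 + 1)]) = blocks ++ pvGo start prev t := by
  intro t
  induction t with
  | nil => intro blocks start prev _; simp [pvGo]
  | cons x xs ih =>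
    intro blocks start prev hpw
    rcases List.pairwise_cons.mp hpw with ⟨hlt, hpw'⟩
    have hx : prev < x := hlt x (by simp)
    by_cases hgap : x > prev + 1
    · have : List.foldl pvStepA (blocks, start, prev) (x :: xs)
           = List.foldl pvStepA (blocks ++ [(start, prev, prev - start + 1)], x, x) xs := by
        simp [List.foldl, pvStepA, hgap]
      rw [show pvGo start prev (x :: xs)
            = (start, prev, prev - start + 1) :: pvGo x x xs from by
          simp [pvGo, show ¬ x = prev + 1 by omega]]
      simpa [this, List.append_assoc] using
        ih (blocks ++ [(start, prev, prev - start + 1)]) x x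
          (List.pairwise_cons.mpr ⟨fun y hy => (List.pairwise_cons.mp hpw').1 y hy, (List.pairwise_cons.mp hpw').2⟩)
    · have hxe : x = prev + 1 := by omega
      have : List.foldl pvStepA (blocks, start, prev) (x :: xs)
           = List.foldl pvStepA (blocks, start, x) xs := by
        simp [List.foldl, pvStepA, hgap]
      rw [show pvGo start prev (x :: xs) = pvGo start x xs from by simp [pvGo, hxe]]
      exact this ▸ ih blocks start x hpw'

-- the while-loop reaches the end of a contiguous interval of s
lemma pvRunEnd_eq (s : List Int) (b : Int) (hend : (b + 1) ∉ s) :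
    ∀ (fuel : Nat) (a : Int), a ≤ b → (∀ i : Int, a ≤ i → i ≤ b → i ∈ s) →
      (b - a).toNat ≤ fuel → pvRunEnd s a fuel = b := by
  intro fuel
  induction fuel with
  | zero =>
    intro a hab hint hf
    have : a = b := by omega
    simp [pvRunEnd, this]
  | succ f ih =>
    intro a hab hint hf
    by_cases hEq : a = b
    · subst hEq; simp [pvRunEnd, hend]
    · have hmem : (a + 1) ∈ s := hint (a + 1) (by omega) (by omega)
      simp only [pvRunEnd, if_pos hmem]
      exact ih (a + 1) (by omega) (fun i h1 h2 => hint i (by omega) h2) (by omega)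

-- an integer interval contained in a Nodup list bounds its length
lemma pvIntervalLen (s : List Int) (a b : Int) (hab : a ≤ b)
    (hint : ∀ i : Int, a ≤ i → i ≤ b → i ∈ s) : (b - a).toNat < s.length := by
  set l : List Int := (List.range ((b - a).toNat + 1)).map (fun i : Nat => a + (i : Int)) with hl
  have hnd' : l.Nodup := by
    rw [hl]
    refine List.Nodup.map ?_ List.nodup_range
    intro i j h
    dsimp only at h
    omega
  have hsubl : l ⊆ s := by
    rw [hl]
    intro x hx
    rcases List.mem_map.mp hx with ⟨i, hi, rfl⟩
    have hi' : i < (b - a).toNat + 1 := List.mem_range.mp hi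
    exact hint _ (by omega) (by omega)
  have hlen : l.length ≤ s.length := by
    calc l.length = l.toFinset.card := (List.toFinset_card_of_nodup hnd').symm
    _ ≤ s.toFinset.card := Finset.card_le_card (by intro x hx; simp only [List.mem_toFinset] at hx ⊢; exact hsubl hx)
    _ ≤ s.length := s.toFinset_card_le
  have : l.length = (b - a).toNat + 1 := by simp [hl]
  omega

-- main correspondence: A's merged run list equals B's start-detect-and-walk, B side pre-sorted
lemma pvMain : ∀ (t : List Int) (start prev : Int) (s : List Int),
    List.Pairwise (· < ·) (prev :: t) →
    start ≤ prev →
    (∀ i : Int, start ≤ i → i ≤ prev → i ∈ s) →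
    (∀ x ∈ t, x ∈ s) →
    (∀ x ∈ s, x ≤ prev ∨ x ∈ t) →
    pvGo start prev t =
      (start :: t.filter (fun x => decide ((x - 1) ∉ s))).map
        (fun st => (st, pvRunEnd s st s.length, pvRunEnd s st s.length - st + 1)) := by
  intro t
  induction t with
  | nil =>
    intro start prev s hpw hsp hint hts hsub
    have hend : (prev + 1) ∉ s := by
      intro hm
      rcases hsub _ hm with h | h
      · omega
      · simp at h
    have hE : pvRunEnd s start s.length = prev :=
      pvRunEnd_eq s prev hend s.length start hsp hint
        (le_of_lt (pvIntervalLen s start prev hsp hint))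
    simp [pvGo, hE]
  | cons x xs ih =>
    intro start prev s hpw hsp hint hts hsub
    rcases List.pairwise_cons.mp hpw with ⟨hlt, hpw'⟩
    have hx : prev < x := hlt x (by simp)
    have hxs_gt : ∀ y ∈ xs, x < y := (List.pairwise_cons.mp hpw').1
    by_cases hxe : x = prev + 1
    · -- x extends the current run; x - 1 = prev ∈ s so the filter drops x
      have hxm : decide ((x - 1) ∉ s) = false := by
        simp only [decide_eq_false_iff_not, not_not]
        have : x - 1 = prev := by omega
        rw [this]; exact hint prev hsp le_rfl
      have hrec := ih start x s hpw' (by omega)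
        (fun i h1 h2 => by
          by_cases hip : i ≤ prev
          · exact hint i h1 hip
          · have hix : i = x := by omega
            rw [hix]; exact hts x (by simp))
        (fun y hy => hts y (by simp [hy]))
        (fun y hy => by
          rcases hsub y hy with h | h
          · exact Or.inl (by omega)
          · rcases List.mem_cons.mp h with h | h
            · exact Or.inl (by omega)
            · exact Or.inr h)
      simp only [pvGo, if_pos hxe, List.filter_cons, hxm]
      exact hrec
    · -- gap: x starts a new block; x - 1 ∉ s so the filter keeps x
      have hgap : prev + 1 < x := by omega
      have hxm : decide ((x - 1) ∉ s) = true := by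
        simp only [decide_eq_true_eq]
        intro hm
        rcases hsub _ hm with h | h
        · omega
        · rcases List.mem_cons.mp h with h | h
          · omega
          · exact absurd (hxs_gt _ h) (by omega)
      have hend : (prev + 1) ∉ s := by
        intro hm
        rcases hsub _ hm with h | h
        · omega
        · rcases List.mem_cons.mp h with h | h
          · omega
          · exact absurd (hxs_gt _ h) (by omega)
      have hE : pvRunEnd s start s.length = prev :=
        pvRunEnd_eq s prev hend s.length start hsp hint
          (le_of_lt (pvIntervalLen s start prev hsp hint))
      have hrec := ih x x s hpw' le_rfl
        (fun i h1 h2 => by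
          have hix : i = x := by omega
          rw [hix]; exact hts x (by simp))
        (fun y hy => hts y (by simp [hy]))
        (fun y hy => by
          rcases hsub y hy with h | h
          · exact Or.inl (by omega)
          · rcases List.mem_cons.mp h with h | h
            · exact Or.inl (by omega)
            · exact Or.inr h)
      simp only [pvGo, if_neg hxe, List.filter_cons, hxm, if_true, List.map_cons, hE]
      simp only [List.map_cons] at hrec
      rw [hrec]

-- ===== VERDICT (by name: the statement is the Claim_ definition above) =====
theorem find_contiguous_line_blocks_py_spec : Claim_equal_find_contiguous_line_blocks_py := by
  intro lines _
  unfold Spec_find_contiguous_line_blocks_py find_contiguous_line_blocks_py find_contiguous_line_blocks_py_alt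
  by_cases hnil : lines = []
  · subst hnil; simp [PySem.Set.ofList, PySem.List.sorted]
  · simp only [if_neg hnil]
    have hpw := PySem.List.sorted_ofList_pairwise_lt (xs := lines)
    cases hs : PySem.List.sorted (PySem.Set.ofList lines) (fun x => x) false with
    | nil =>
      exfalso
      have h0 : PySem.Set.ofList lines = [] := (PySem.List.sorted_eq_nil_iff _ _ _).mp hs
      cases lines with
      | nil => exact hnil rfl
      | cons a rest =>
        have ha : a ∈ PySem.Set.ofList (a :: rest) := by simp [PySem.Set.mem_ofList]
        rw [h0] at ha
        simp at ha
    | cons h t =>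
      rw [hs] at hpw
      -- x ∈ set(lines) ↔ x ∈ h :: t
      have hmemL : ∀ x : Int, x ∈ PySem.Set.ofList lines ↔ x ∈ h :: t := by
        intro x
        rw [← hs, PySem.List.mem_sorted]
      have hlt : ∀ y ∈ t, h < y := (List.pairwise_cons.mp hpw).1
      -- the A side: fold = pvGo
      have hA := pvFoldA_go t [] h h hpw
      simp only [List.nil_append] at hA
      -- the B side pre-sort starts list: sorted(filter) = filter of the sorted list
      have hperm : (List.filter (fun x => decide ((x - 1) ∉ PySem.Set.ofList lines)) (h :: t)).Perm
          ((PySem.Set.ofList lines).filter (fun x => decide ((x - 1) ∉ PySem.Set.ofList lines))) := by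
        exact List.Perm.filter _ (by rw [← hs]; exact PySem.List.sorted_perm _ _ _)
      have hpwf : (List.filter (fun x => decide ((x - 1) ∉ PySem.Set.ofList lines)) (h :: t)).Pairwise (· < ·) :=
        List.Pairwise.sublist List.filter_sublist hpw
      have hstarts : PySem.List.sorted
            ((PySem.Set.ofList lines).filter (fun x => decide ((x - 1) ∉ PySem.Set.ofList lines)))
            (fun x => x) false
          = List.filter (fun x => decide ((x - 1) ∉ PySem.Set.ofList lines)) (h :: t) :=
        PySem.List.sorted_eq_of_perm_of_pairwise_lt _ _ _ hperm hpwf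
      -- h is kept by the filter (h - 1 is below the minimum)
      have hh : decide ((h - 1) ∉ PySem.Set.ofList lines) = true := by
        simp only [decide_eq_true_eq]
        intro hm
        rcases List.mem_cons.mp ((hmemL _).mp hm) with h1 | h1
        · omega
        · exact absurd (hlt _ h1) (by omega)
      have hmain := pvMain t h h (PySem.Set.ofList lines) hpw le_rfl
        (fun i h1 h2 => by
          have : i = h := by omega
          rw [this, hmemL]; simp)
        (fun y hy => (hmemL y).mpr (by simp [hy]))
        (fun y hy => by
          rcases List.mem_cons.mp ((hmemL y).mp hy) with h1 | h1
          · exact Or.inl (le_of_eq h1)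
          · exact Or.inr h1)
      simp only [hstarts, List.filter_cons, hh, if_true]
      rw [hA, hmain]
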